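-- pv_equiv track=rewrite | github.com/ShumaoHou/MyOJ | mi_oj/11.py | solution
-- ===== SOURCE A (Python) =====
-- def solution(line):
--     a, b = line.strip().split()
--     res = "false"   # 注意：返回的是字符串“false”和“true”
--     bDict = dict()
--     for i in range(len(b)):
--         if b[i] not in bDict.keys():
--             bDict[b[i]] = 1
--         else:
--             bDict[b[i]] += 1
--     for i in range(len(a)):
--         if a[i] not in bDict.keys() or bDict[a[i]] <= 0:
--             return res
--         bDict[a[i]] -= 1
--     res = "true"
--     return res
-- ===== SOURCE B (Python) =====
-- def solution(line):
--     a, b = line.strip().split()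
--     countA = {}
--     for c in a:
--         countA[c] = countA.get(c, 0) + 1
--     countB = {}
--     for c in b:
--         countB[c] = countB.get(c, 0) + 1
--     return "true" if all(countA[c] <= countB.get(c, 0) for c in countA) else "false"
-- ===== Notes on version B (the rewrite author's own statement) =====
-- stated objective: simpler
-- what changed: B counts both strings into frequency tables and does one table comparison, instead of A's greedy consume-and-decrement loop over a with early exit that mutates b's table.
import Mathlib
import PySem

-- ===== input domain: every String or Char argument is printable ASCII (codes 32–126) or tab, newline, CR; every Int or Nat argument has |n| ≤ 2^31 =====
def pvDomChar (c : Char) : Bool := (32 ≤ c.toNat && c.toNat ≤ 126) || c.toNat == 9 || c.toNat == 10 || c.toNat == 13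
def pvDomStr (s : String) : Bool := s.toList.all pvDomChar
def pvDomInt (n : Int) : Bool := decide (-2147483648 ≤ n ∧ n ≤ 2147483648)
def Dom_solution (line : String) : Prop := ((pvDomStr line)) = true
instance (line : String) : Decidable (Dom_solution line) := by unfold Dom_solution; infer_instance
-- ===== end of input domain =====

-- B counts both strings into frequency tables and compares them once, instead of A's
-- greedy consume-and-decrement loop over a with early exit. Equivalence on lines whose
-- strip().split() has exactly two tokens (A raises ValueError otherwise).

-- ===== PORT A =====
-- the second for-loop of A (over a's characters, with its early 'return res'):
-- recursion over a's characters carrying bDict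
def solAConsume (al : List Char) (d : PySem.Dict Char Int) : String :=
  match al with
  | [] => "true"
  | c :: rest =>
    if !d.contains c || decide (d.getD c 0 ≤ 0) then "false"
    else solAConsume rest (d.insert c (d.getD c 0 - 1))

def solution (line : String) : String :=
  match PySem.Str.split₀ (PySem.Str.strip line) with
  | [a, b] =>
    let bDict := b.toList.foldl
      (fun d c => if d.contains c = false then d.insert c 1 else d.insert c (d.getD c 0 + 1))
      PySem.Dict.empty
    solAConsume a.toList bDict
  | _ => ""   -- unreachable under Pre_solution (Python raises ValueError on unpacking)

-- ===== PORT B =====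
def solution_alt (line : String) : String :=
  let ts := PySem.Str.split₀ (PySem.Str.strip line)
  if hts : ts.length = 2 then
    let a := ts[0]'(by omega)
    let b := ts[1]'(by omega)
    let countA := a.toList.foldl (fun d c => d.insert c (d.getD c 0 + 1)) (PySem.Dict.empty : PySem.Dict Char Int)
    let countB := b.toList.foldl (fun d c => d.insert c (d.getD c 0 + 1)) (PySem.Dict.empty : PySem.Dict Char Int)
    if countA.keys.all (fun c => decide (countA.getD c 0 ≤ countB.getD c 0)) then "true"
    else "false"
  else ""   -- unreachable under Pre_solution (Python raises ValueError on unpacking)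

-- ===== PRECONDITION & SPEC =====
-- Pre_ excludes exactly the lines whose stripped split is not two tokens: there
-- 'a, b = line.strip().split()' raises ValueError in both A and B.
def Pre_solution (line : String) : Prop :=
  (PySem.Str.split₀ (PySem.Str.strip line)).length = 2
instance (line : String) : Decidable (Pre_solution line) := by
  unfold Pre_solution; infer_instance

def pvWitness_solution : String := "abc aabbc"

def Spec_solution (line : String) (out : String) : Prop := out = solution_alt line
instance (line : String) (out : String) : Decidable (Spec_solution line out) := by
  unfold Spec_solution; infer_instance

-- ===== CLAIM (what is proved, stated in full; the proofs are below) =====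
def Claim_equal_solution : Prop :=
  ∀ (line : String), Dom_solution line → Pre_solution line → Spec_solution line (solution line)

-- ===== LEMMAS AND PROOFS =====

-- A's build loop equals the plain get-then-insert counting loop
lemma buildA_eq (l : List Char) (d : PySem.Dict Char Int) :
    l.foldl (fun d c => if d.contains c = false then d.insert c 1
                        else d.insert c (d.getD c 0 + 1)) d
      = l.foldl (fun d c => d.insert c (d.getD c 0 + 1)) d := by
  apply PySem.List.foldl_congr_mem
  intro acc c _
  by_cases h : acc.contains c = true
  · simp [h]
  · simp only [Bool.not_eq_true] at h
    simp [h, PySem.Dict.getD_of_not_contains acc 0 h]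

-- A's greedy consuming loop succeeds iff every character's multiplicity fits the table
lemma consume_eq (al : List Char) (d : PySem.Dict Char Int) :
    solAConsume al d
      = if ∀ c ∈ al, (al.count c : Int) ≤ d.getD c 0 then "true" else "false" := by
  induction al generalizing d with
  | nil => simp [solAConsume]
  | cons c rest ih =>
    have hfail : d.getD c 0 ≤ 0 →
        ¬ ∀ c' ∈ c :: rest, ((c :: rest).count c' : Int) ≤ d.getD c' 0 := by
      intro hz h
      have := h c (by simp)
      have hcnt : 1 ≤ (c :: rest).count c := by simp
      omega
    by_cases hc : d.contains c = true
    · by_cases hz : d.getD c 0 ≤ 0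
      · rw [solAConsume, if_pos (by simp [hc, hz]), if_neg (hfail hz)]
      · have hpos : 0 < d.getD c 0 := by omega
        have key : (∀ c' ∈ c :: rest, ((c :: rest).count c' : Int) ≤ d.getD c' 0)
            ↔ (∀ c' ∈ rest, (rest.count c' : Int) ≤ (d.insert c (d.getD c 0 - 1)).getD c' 0) := by
          constructor
          · intro h c' hc'
            rw [PySem.Dict.getD_insert]
            by_cases he : c' = c
            · subst he
              have := h c' (by simp)
              simp only [List.count_cons_self] at this
              simp only
              push_cast at this ⊢; omega
            · have := h c' (by simp [hc'])
              rw [List.count_cons_of_ne (fun hx => he hx.symm)] at this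
              simp [he, this]
          · intro h c' hc'
            by_cases he : c' = c
            · subst he
              by_cases hmem : c' ∈ rest
              · have := h c' hmem
                rw [PySem.Dict.getD_insert, if_pos rfl] at this
                simp only [List.count_cons_self]
                push_cast at this ⊢; omega
              · simp only [List.count_cons_self, List.count_eq_zero_of_not_mem hmem]
                push_cast; omega
            · have hmem : c' ∈ rest := (List.mem_cons.mp hc').resolve_left he
              have := h c' hmem
              rw [PySem.Dict.getD_insert, if_neg he] at this
              rw [List.count_cons_of_ne (fun hx => he hx.symm)]
              exact this
        rw [solAConsume]
        simp only [hc, Bool.not_true, Bool.false_or, decide_eq_true_eq]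
        rw [if_neg hz, ih]
        exact (if_congr key.symm rfl rfl)
    · have hc' : d.contains c = false := by simpa using hc
      have h0 : d.getD c 0 = 0 := PySem.Dict.getD_of_not_contains d 0 hc'
      rw [solAConsume, if_pos (by simp [hc']), if_neg (hfail (by omega))]

-- reduction of each port once the token list is known to be a two-element list
lemma solutionA_eq (line : String) (a b : String)
    (h : PySem.Str.split₀ (PySem.Str.strip line) = [a, b]) :
    solution line = solAConsume a.toList
      (b.toList.foldl
        (fun d c => if d.contains c = false then d.insert c 1 else d.insert c (d.getD c 0 + 1))
        PySem.Dict.empty) := by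
  unfold solution
  rw [h]

lemma solutionB_eq (line : String) (a b : String)
    (h : PySem.Str.split₀ (PySem.Str.strip line) = [a, b]) :
    solution_alt line =
      (if ((a.toList.foldl (fun d c => d.insert c (d.getD c 0 + 1)) (PySem.Dict.empty : PySem.Dict Char Int)).keys.all
            (fun c => decide ((a.toList.foldl (fun d c => d.insert c (d.getD c 0 + 1)) (PySem.Dict.empty : PySem.Dict Char Int)).getD c 0
              ≤ (b.toList.foldl (fun d c => d.insert c (d.getD c 0 + 1)) (PySem.Dict.empty : PySem.Dict Char Int)).getD c 0)))
        then "true" else "false") := by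
  unfold solution_alt
  simp only [h]
  simp

-- ===== VERDICT (by name: the statement is the Claim_ definition above) =====
theorem solution_spec : Claim_equal_solution := by
  intro line _ hpre
  unfold Pre_solution at hpre
  have hab : ∃ a b, PySem.Str.split₀ (PySem.Str.strip line) = [a, b] := by
    cases h : PySem.Str.split₀ (PySem.Str.strip line) with
    | nil => rw [h] at hpre; simp at hpre
    | cons a t =>
      cases t with
      | nil => rw [h] at hpre; simp at hpre
      | cons b t2 =>
        cases t2 with
        | nil => exact ⟨a, b, rfl⟩
        | cons c t3 => rw [h] at hpre; simp at hpre
  obtain ⟨a, b, hts⟩ := hab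
  unfold Spec_solution
  rw [solutionA_eq line a b hts, solutionB_eq line a b hts]
  rw [buildA_eq, consume_eq]
  apply if_congr _ rfl rfl
  simp only [PySem.Dict.foldl_insert_getD_add_one_eq_counter, PySem.Dict.keys_counter,
    PySem.Dict.getD_counter, List.all_eq_true, PySem.Set.mem_ofList, decide_eq_true_eq]
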